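-- pv_equiv track=rewrite | github.com/jcolinpatrick/kryptos | scripts/transposition/columnar/e_grid31_k3_widths_keyed_03.py | cyclic_keyword_order
-- ===== SOURCE A (Python) =====
-- def cyclic_keyword_order(keyword, ncols):
--     """Repeat keyword cyclically to fill ncols, then rank to get column order."""
--     extended = ''.join(keyword[i % len(keyword)] for i in range(ncols))
--     indexed = [(ch, i) for i, ch in enumerate(extended)]
--     sorted_idx = sorted(indexed, key=lambda x: (x[0], x[1]))
--     col_order = [0] * ncols
--     for rank, (_, pos) in enumerate(sorted_idx):
--         col_order[rank] = pos
--     return col_order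
-- ===== SOURCE B (Python) =====
-- def cyclic_keyword_order(keyword, ncols):
--     """Bucket (counting) sort by character code over the fixed ASCII alphabet:
--     one pass over the columns, no sorting."""
--     if ncols <= 0:
--         return []
--     L = len(keyword)
--     buckets = [[] for _ in range(128)]
--     for i in range(ncols):
--         buckets[ord(keyword[i % L])].append(i)
--     out = []
--     for b in buckets:
--         out += b
--     return out
-- ===== Notes on version B (the rewrite author's own statement) =====
-- stated objective: faster
-- what changed: Replaces building the extended string and comparison-sorting (char,index) pairs by a single-pass stable bucket (counting) sort over the fixed 128-slot ASCII alphabet, concatenating the buckets in code order.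
import Mathlib
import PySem

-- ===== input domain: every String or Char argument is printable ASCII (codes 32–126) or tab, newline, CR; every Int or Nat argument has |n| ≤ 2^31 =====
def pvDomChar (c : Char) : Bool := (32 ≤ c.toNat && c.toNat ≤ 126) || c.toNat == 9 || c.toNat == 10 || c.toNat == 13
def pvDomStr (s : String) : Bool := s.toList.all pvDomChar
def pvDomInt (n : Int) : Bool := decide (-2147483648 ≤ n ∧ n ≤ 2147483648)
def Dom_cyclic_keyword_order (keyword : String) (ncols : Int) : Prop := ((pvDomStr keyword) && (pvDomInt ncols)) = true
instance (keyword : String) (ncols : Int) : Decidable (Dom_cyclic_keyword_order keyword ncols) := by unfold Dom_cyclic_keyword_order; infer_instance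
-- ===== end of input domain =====

-- B replaces A's comparison sort of (char, index) pairs by a one-pass stable bucket
-- (counting) sort over the 128-slot ASCII alphabet: objective = faster (asymptotic).

-- ===== PORT A =====
def cyclic_keyword_order (keyword : String) (ncols : Int) : List Int :=
  let ks := keyword.toList
  -- extended = ''.join(keyword[i % len(keyword)] for i in range(ncols));
  -- the ' ' default of pyGetD is never used under Pre_ (keyword ≠ "" there, so i % len is in range)
  let extended : List Char :=
    (PySem.List.pyRange 0 ncols 1).map
      (fun i => PySem.List.pyGetD ks (PySem.Int.mod i (ks.length : Int)) ' ')
  -- indexed = [(ch, i) for i, ch in enumerate(extended)]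
  let indexed : List (Char × Int) :=
    (PySem.List.enumerate extended).map (fun p => (p.2, p.1))
  -- sorted_idx = sorted(indexed, key=lambda x: (x[0], x[1]))
  let sorted_idx := PySem.List.sorted2 indexed (fun x => x.1) (fun x => x.2)
  -- col_order = [0] * ncols; for rank, (_, pos) in enumerate(sorted_idx): col_order[rank] = pos
  let col_order : List Int := List.replicate ncols.toNat 0
  (PySem.List.enumerate sorted_idx).foldl
    (fun co p => PySem.List.pySetD co p.1 p.2.2) col_order

-- ===== PORT B =====
def cyclic_keyword_order_alt (keyword : String) (ncols : Int) : List Int :=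
  if ncols ≤ 0 then []
  else
    let ks := keyword.toList
    -- buckets = [[] for _ in range(128)]; for i in range(ncols): buckets[ord(keyword[i % L])].append(i)
    let buckets : List (List Int) :=
      (PySem.List.pyRange 0 ncols 1).foldl
        (fun b i =>
          b.modify (PySem.List.pyGetD ks (PySem.Int.mod i (ks.length : Int)) ' ').toNat
            (fun l => l ++ [i]))
        (List.replicate 128 [])
    -- out = []; for b in buckets: out += b
    buckets.foldl (fun out bkt => out ++ bkt) []

-- ===== PRECONDITION & SPEC =====
-- Pre_ excludes exactly the inputs where Python A raises ZeroDivisionError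
-- (empty keyword with ncols > 0, from 'i % len(keyword)'); B raises there too.
def Pre_cyclic_keyword_order (keyword : String) (ncols : Int) : Prop :=
  keyword ≠ "" ∨ ncols ≤ 0
instance (keyword : String) (ncols : Int) : Decidable (Pre_cyclic_keyword_order keyword ncols) := by
  unfold Pre_cyclic_keyword_order; infer_instance
def pvWitness_cyclic_keyword_order : String × Int := ("KRYPTOS", 10)

def Spec_cyclic_keyword_order (keyword : String) (ncols : Int) (out : List Int) : Prop := out = cyclic_keyword_order_alt keyword ncols
instance (keyword : String) (ncols : Int) (out : List Int) : Decidable (Spec_cyclic_keyword_order keyword ncols out) := by unfold Spec_cyclic_keyword_order; infer_instance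

-- ===== CLAIM (what is proved, stated in full; the proofs are below) =====
def Claim_equal_cyclic_keyword_order : Prop := ∀ (keyword : String) (ncols : Int), Dom_cyclic_keyword_order keyword ncols → Pre_cyclic_keyword_order keyword ncols → Spec_cyclic_keyword_order keyword ncols (cyclic_keyword_order keyword ncols)

-- ===== LEMMAS AND PROOFS =====

-- Python's tuple order on the (char, index) keys, as a Prop
def pvLexLt (a b : Char × Int) : Prop := a.1 < b.1 ∨ (a.1 = b.1 ∧ a.2 < b.2)

-- the Boolean "before" test sorted2 uses (reverse = false)
def pvKeyB (a b : Char × Int) : Bool :=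
  decide (a.1 < b.1) || (!decide (b.1 < a.1) && decide (a.2 < b.2))

theorem pvKeyB_iff (a b : Char × Int) : pvKeyB a b = true ↔ pvLexLt a b := by
  unfold pvKeyB pvLexLt
  rcases lt_trichotomy a.1 b.1 with h | h | h <;>
    simp [h, not_lt_of_gt, le_of_eq, h.le] <;>
    first
      | simp [not_lt_of_gt h, h.ne]
      | simp [h.le, not_lt.2 h.le, h.ne', not_lt_of_gt h]

theorem pvLexLt_asymm {a b : Char × Int} (h : pvLexLt a b) : ¬ pvLexLt b a := by
  rcases h with h | ⟨h1, h2⟩ <;> rintro (h' | ⟨h1', h2'⟩)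
  · exact absurd h' (not_lt_of_gt h)
  · exact absurd h (by rw [h1']; exact lt_irrefl _)
  · exact absurd h' (by rw [h1]; exact lt_irrefl _)
  · exact absurd h2' (not_lt_of_gt h2)

theorem pvLexLt_trans {a b c : Char × Int} (h1 : pvLexLt a b) (h2 : pvLexLt b c) : pvLexLt a c := by
  rcases h1 with h1 | ⟨h1, h1'⟩ <;> rcases h2 with h2 | ⟨h2, h2'⟩
  · exact Or.inl (h1.trans h2)
  · exact Or.inl (h2 ▸ h1)
  · exact Or.inl (h1 ▸ h2)
  · exact Or.inr ⟨h1.trans h2, h1'.trans h2'⟩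

theorem pvLexLt_total {a b : Char × Int} (h : a ≠ b) : pvLexLt a b ∨ pvLexLt b a := by
  unfold pvLexLt
  rcases lt_trichotomy a.1 b.1 with h1 | h1 | h1
  · exact Or.inl (Or.inl h1)
  · rcases lt_trichotomy a.2 b.2 with h2 | h2 | h2
    · exact Or.inl (Or.inr ⟨h1, h2⟩)
    · exact absurd (Prod.ext h1 h2) h
    · exact Or.inr (Or.inr ⟨h1.symm, h2⟩)
  · exact Or.inr (Or.inl h1)

-- insertion keeps the list a permutation
theorem pv_insertBy_perm (bf : Char × Int → Char × Int → Bool) (x : Char × Int)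
    (l : List (Char × Int)) : (PySem.List.insertBy bf x l).Perm (x :: l) := by
  induction l with
  | nil => simp [PySem.List.insertBy]
  | cons y ys ih =>
      by_cases h : bf x y = true
      · simp [PySem.List.insertBy, h]
      · simp only [PySem.List.insertBy, h]
        exact ((ih.cons y).trans (List.Perm.swap x y ys)).trans (List.Perm.refl _)

theorem pv_foldl_insertBy_perm (l : List (Char × Int)) :
    ∀ init : List (Char × Int),
      (l.foldl (fun acc x => PySem.List.insertBy pvKeyB x acc) init).Perm (init ++ l) := by
  induction l with
  | nil => intro init; simp
  | cons x xs ih =>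
      intro init
      exact ((ih _).trans
        ((pv_insertBy_perm pvKeyB x init).append_right xs)).trans List.perm_middle.symm

-- insertion keeps the "never strictly later" pairwise order
theorem pv_insertBy_pairwise (x : Char × Int) (l : List (Char × Int))
    (hl : l.Pairwise (fun a b => ¬ pvLexLt b a)) :
    (PySem.List.insertBy pvKeyB x l).Pairwise (fun a b => ¬ pvLexLt b a) := by
  induction l with
  | nil => simp [PySem.List.insertBy]
  | cons y ys ih =>
      rcases List.pairwise_cons.1 hl with ⟨hy, hys⟩
      by_cases h : pvKeyB x y = true
      · have hxy : pvLexLt x y := (pvKeyB_iff x y).1 h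
        simp only [PySem.List.insertBy, h, if_pos]
        refine List.pairwise_cons.2 ⟨?_, hl⟩
        intro z hz
        rcases List.mem_cons.1 hz with rfl | hz
        · exact pvLexLt_asymm hxy
        · intro hzx
          exact hy z hz (pvLexLt_trans hzx hxy)
      · have hxy : ¬ pvLexLt x y := fun hh => h ((pvKeyB_iff x y).2 hh)
        simp only [PySem.List.insertBy, h, if_neg, Bool.false_eq_true, not_false_iff]
        refine List.pairwise_cons.2 ⟨?_, ih hys⟩
        intro z hz
        rcases (PySem.List.mem_insertBy pvKeyB x z ys).1 hz with rfl | hz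
        · exact hxy
        · exact hy z hz

theorem pv_foldl_insertBy_pairwise (l : List (Char × Int)) :
    ∀ init : List (Char × Int), init.Pairwise (fun a b => ¬ pvLexLt b a) →
      (l.foldl (fun acc x => PySem.List.insertBy pvKeyB x acc) init).Pairwise
        (fun a b => ¬ pvLexLt b a) := by
  induction l with
  | nil => intro init h; simpa using h
  | cons x xs ih => intro init h; exact ih _ (pv_insertBy_pairwise x init h)

-- any strictly key-increasing permutation IS what sorted2 returns
theorem pv_sorted2_eq {xs ys : List (Char × Int)} (hperm : ys.Perm xs)
    (hpw : ys.Pairwise pvLexLt) :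
    PySem.List.sorted2 xs (fun x => x.1) (fun x => x.2) = ys := by
  have hdef : PySem.List.sorted2 xs (fun x : Char × Int => x.1) (fun x => x.2)
      = xs.foldl (fun acc x => PySem.List.insertBy pvKeyB x acc) [] := rfl
  rw [hdef]
  set s := xs.foldl (fun acc x => PySem.List.insertBy pvKeyB x acc) [] with hs
  have hsp : s.Perm xs := by simpa using pv_foldl_insertBy_perm xs []
  have hspw : s.Pairwise (fun a b => ¬ pvLexLt b a) :=
    pv_foldl_insertBy_pairwise xs [] (by simp)
  have hypw : ys.Pairwise (fun a b => ¬ pvLexLt b a) := hpw.imp (fun h => pvLexLt_asymm h)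
  refine List.eq_of_perm_of_sorted ?_ hspw hypw (hsp.trans hperm.symm)
  intro a b _ _ h1 h2
  by_contra hne
  rcases pvLexLt_total hne with h | h
  · exact h2 h
  · exact h1 h

-- bucket fill characterised: fold of modify = per-code filters
theorem pv_foldl_modify (code : Int → Nat) (P : List Int) (h : ∀ i ∈ P, code i < 128) :
    P.foldl (fun b i => b.modify (code i) (fun l => l ++ [i])) (List.replicate 128 [])
      = (List.range 128).map (fun c => P.filter (fun i => code i == c)) := by
  induction P using List.reverseRecOn with
  | nil =>
      apply List.ext_getElem <;> simp
  | append_singleton P i ih =>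
      have h' : ∀ j ∈ P, code j < 128 := fun j hj => h j (by simp [hj])
      have hi : code i < 128 := h i (by simp)
      rw [List.foldl_append, ih h', List.foldl_cons, List.foldl_nil]
      apply List.ext_getElem
      · simp [List.length_modify]
      · intro j hj1 hj2
        simp only [List.length_modify, List.length_map, List.length_range] at hj1
        simp only [List.getElem_modify, List.getElem_map, List.getElem_range,
          List.filter_append, List.filter_cons, List.filter_nil]
        by_cases hc : code i = j <;> simp [hc]

-- buckets partition a list into a permutation of itself
theorem pv_flatten_filter_cons (key : Char × Int → Nat) (x : Char × Int)
    (l : List (Char × Int)) :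
    ∀ codes : List Nat, codes.Nodup → key x ∈ codes →
      ((codes.map (fun c => (x :: l).filter (fun p => key p == c))).flatten).Perm
        (x :: (codes.map (fun c => l.filter (fun p => key p == c))).flatten) := by
  intro codes
  induction codes with
  | nil => intro _ hx; simp at hx
  | cons c cs ih =>
      intro hnd hx
      rcases List.nodup_cons.1 hnd with ⟨hc, hcs⟩
      have hrest : key x ∉ cs →
          cs.map (fun c' => (x :: l).filter (fun p => key p == c'))
            = cs.map (fun c' => l.filter (fun p => key p == c')) := by
        intro hxcs
        apply List.map_congr_left
        intro c' hc'
        have : ¬ (key x == c') = true := by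
          simp only [beq_iff_eq]
          exact fun hh => hxcs (hh ▸ hc')
        rw [List.filter_cons, if_neg this]
      rw [List.map_cons, List.map_cons, List.flatten_cons, List.flatten_cons]
      by_cases hkey : key x = c
      · have hxcs : key x ∉ cs := fun hh => hc (hkey ▸ hh)
        rw [hrest hxcs, List.filter_cons, if_pos (by simp [hkey])]
        exact List.Perm.refl _
      · have hx' : key x ∈ cs := by
          rcases List.mem_cons.1 hx with h | h
          · exact absurd h hkey
          · exact h
        rw [List.filter_cons, if_neg (by simp [hkey])]
        exact (((ih hcs hx').append_left _).trans List.perm_middle)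

theorem pv_flatten_filter_perm (key : Char × Int → Nat) (l : List (Char × Int))
    (codes : List Nat) (hnd : codes.Nodup) (h : ∀ x ∈ l, key x ∈ codes) :
    ((codes.map (fun c => l.filter (fun p => key p == c))).flatten).Perm l := by
  induction l with
  | nil => simp
  | cons x xs ih =>
      have hx : key x ∈ codes := h x (by simp)
      have ih' := ih (fun y hy => h y (by simp [hy]))
      exact (pv_flatten_filter_cons key x xs codes hnd hx).trans (ih'.cons x)

-- Char order transfers along toNat
theorem pv_char_lt_of_toNat_lt {a b : Char} (h : a.toNat < b.toNat) : a < b := by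
  rw [Char.lt_def]
  exact h

theorem pv_char_eq_of_toNat_eq {a b : Char} (h : a.toNat = b.toNat) : a = b :=
  Char.eq_of_val_eq (by
    apply UInt32.toNat_inj.1
    exact h)

-- the fold writing positions rank by rank is just the map of second components
theorem pv_foldl_set (ys : List (Char × Int)) :
    ∀ (s : Nat) (zs : List Int), zs.length = s + ys.length →
      (PySem.List.enumerate ys (s : Int)).foldl
          (fun co p => PySem.List.pySetD co p.1 p.2.2) zs
        = zs.take s ++ ys.map (fun p => p.2) := by
  induction ys with
  | nil =>
      intro s zs hlen
      simp only [PySem.List.enumerate_nil, List.foldl_nil, List.map_nil, List.append_nil]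
      simp only [List.length_nil] at hlen
      rw [List.take_of_length_le (by omega)]
  | cons y ys ih =>
      intro s zs hlen
      rw [PySem.List.enumerate_cons, List.foldl_cons]
      have hset : PySem.List.pySetD zs (s : Int) y.2 = zs.set s y.2 := by
        rw [PySem.List.pySetD_of_nonneg zs y.2 (by positivity)]
        simp
      have hcast : (s : Int) + 1 = ((s + 1 : Nat) : Int) := by push_cast; ring
      simp only [List.length_cons] at hlen
      rw [hset, hcast, ih (s + 1) (zs.set s y.2)
        (by simp only [List.length_set]; omega)]
      have hs : s < zs.length := by omega
      rw [List.take_succ, List.take_set, List.getElem?_set_self (by omega)]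
      have hts : (zs.take s).set s y.2 = zs.take s :=
        List.set_eq_of_length_le (by rw [List.length_take]; omega)
      simp [hts]

-- chars of the extended string stay below 128 on the domain
theorem pv_code_lt (keyword : String) (hDom : pvDomStr keyword = true) (i : Int) :
    (PySem.List.pyGetD keyword.toList (PySem.Int.mod i (keyword.toList.length : Int)) ' ').toNat
      < 128 := by
  by_cases h : PySem.Raise.InRange keyword.toList.length
      (PySem.Int.mod i (keyword.toList.length : Int))
  · have hmem := PySem.List.pyGetD_mem keyword.toList ' ' h
    have := (List.all_eq_true.1 hDom) _ hmem
    unfold pvDomChar at this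
    simp only [Bool.or_eq_true, Bool.and_eq_true, decide_eq_true_iff, beq_iff_eq] at this
    omega
  · rw [PySem.List.pyGetD_of_none _ _ _ ((PySem.List.pyGet?_eq_none_iff _ _).2 h)]
    decide

-- extended-string character at column i, and the (char, index) key pair
def pvExt (keyword : String) (i : Int) : Char :=
  PySem.List.pyGetD keyword.toList (PySem.Int.mod i (keyword.toList.length : Int)) ' '

def pvG (keyword : String) (i : Int) : Char × Int := (pvExt keyword i, i)

-- A's indexed list is the pair list over the column range
theorem pv_indexed_eq (keyword : String) (ncols : Int) (hn : 0 ≤ ncols) :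
    (PySem.List.enumerate
        ((PySem.List.pyRange 0 ncols 1).map (fun i =>
          PySem.List.pyGetD keyword.toList (PySem.Int.mod i (keyword.toList.length : Int)) ' '))).map
      (fun p => (p.2, p.1))
    = (PySem.List.pyRange 0 ncols 1).map (pvG keyword) := by
  have hlen : (PySem.List.len
      ((PySem.List.pyRange 0 ncols 1).map (fun i => pvExt keyword i))) = ncols := by
    simp [PySem.List.len, PySem.List.length_pyRange_one]
    omega
  rw [show (fun i => PySem.List.pyGetD keyword.toList
      (PySem.Int.mod i (keyword.toList.length : Int)) ' ') = pvExt keyword from rfl]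
  rw [PySem.List.enumerate_eq_map_pyRange _ ' ', hlen, List.map_map]
  apply List.map_congr_left
  intro i hi
  rcases PySem.List.mem_pyRange_one.1 hi with ⟨h0, h1⟩
  simp only [Function.comp]
  rw [PySem.List.pyGetD_map_pyRange_of_nonneg (pvExt keyword) ncols i ' ' h0 h1]
  rfl

-- the pair buckets are strictly increasing in Python's tuple order
theorem pv_ys_pairwise (keyword : String) (ncols : Int) :
    (((List.range 128).map (fun c =>
        ((PySem.List.pyRange 0 ncols 1).map (pvG keyword)).filter
          (fun p => p.1.toNat == c))).flatten).Pairwise pvLexLt := by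
  rw [List.pairwise_flatten]
  constructor
  · intro l hl
    rcases List.mem_map.1 hl with ⟨c, _, rfl⟩
    have hsnd : (((PySem.List.pyRange 0 ncols 1).map (pvG keyword)).filter
        (fun p => p.1.toNat == c)).Pairwise (fun p q => p.2 < q.2) :=
      List.Pairwise.filter _
        (List.Pairwise.map _ (fun a b h => h) (PySem.List.pairwise_lt_pyRange_one 0 ncols))
    refine hsnd.imp_of_mem ?_
    intro a b ha hb hab
    have ha' := List.of_mem_filter ha
    have hb' := List.of_mem_filter hb
    simp only [beq_iff_eq] at ha' hb'
    exact Or.inr ⟨pv_char_eq_of_toNat_eq (ha'.trans hb'.symm), hab⟩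
  · rw [List.pairwise_map]
    refine List.pairwise_lt_range.imp_of_mem ?_
    intro c1 c2 _ _ hlt x hx y hy
    have hx' := List.of_mem_filter hx
    have hy' := List.of_mem_filter hy
    simp only [beq_iff_eq] at hx' hy'
    exact Or.inl (pv_char_lt_of_toNat_lt (by omega))

-- every key code lands in range 128 on the domain
theorem pv_mem_codes (keyword : String) (hDom : pvDomStr keyword = true) (ncols : Int) :
    ∀ p ∈ (PySem.List.pyRange 0 ncols 1).map (pvG keyword),
      p.1.toNat ∈ List.range 128 := by
  intro p hp
  rcases List.mem_map.1 hp with ⟨i, _, rfl⟩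
  exact List.mem_range.2 (pv_code_lt keyword hDom i)

-- ===== VERDICT (by name: the statement is the Claim_ definition above) =====
theorem cyclic_keyword_order_spec : Claim_equal_cyclic_keyword_order := by
  intro keyword ncols hDom _hPre
  unfold Spec_cyclic_keyword_order
  have hDomStr : pvDomStr keyword = true := by
    unfold Dom_cyclic_keyword_order at hDom
    rw [Bool.and_eq_true] at hDom
    exact hDom.1
  by_cases hn : ncols ≤ 0
  · have hnil : PySem.List.pyRange 0 ncols 1 = [] :=
      PySem.List.pyRange_one_eq_nil hn
    have htn : ncols.toNat = 0 := Int.toNat_of_nonpos hn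
    have hsnil : PySem.List.sorted2 ([] : List (Char × Int))
        (fun x => x.1) (fun x => x.2) = [] := rfl
    simp [cyclic_keyword_order, cyclic_keyword_order_alt, hn, hnil, htn, hsnil,
      PySem.List.enumerate_nil]
  · -- the strictly increasing bucket arrangement of the (char, index) pairs
    set P := PySem.List.pyRange 0 ncols 1 with hP
    set ys := ((List.range 128).map (fun c =>
        (P.map (pvG keyword)).filter (fun p => p.1.toNat == c))).flatten with hys
    have hperm : ys.Perm (P.map (pvG keyword)) :=
      pv_flatten_filter_perm (fun p => p.1.toNat) (P.map (pvG keyword))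
        (List.range 128) List.nodup_range (pv_mem_codes keyword hDomStr ncols)
    have hsorted : PySem.List.sorted2 (P.map (pvG keyword))
        (fun x => x.1) (fun x => x.2) = ys :=
      pv_sorted2_eq hperm (pv_ys_pairwise keyword ncols)
    -- A computes the second components of the sorted pair list
    have hA : cyclic_keyword_order keyword ncols = ys.map (fun p => p.2) := by
      simp only [cyclic_keyword_order]
      rw [pv_indexed_eq keyword ncols (by omega), hsorted]
      have hlen : (List.replicate ncols.toNat (0 : Int)).length = 0 + ys.length := by
        rw [hperm.length_eq]
        simp only [List.length_replicate, List.length_map, Nat.zero_add, hP,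
          PySem.List.length_pyRange_one]
        omega
      have := pv_foldl_set ys 0 (List.replicate ncols.toNat 0) hlen
      simpa using this
    -- B computes the bucket concatenation of the column indices
    have hB : cyclic_keyword_order_alt keyword ncols
        = ((List.range 128).map (fun c =>
            P.filter (fun i => (pvExt keyword i).toNat == c))).flatten := by
      simp only [cyclic_keyword_order_alt, if_neg hn]
      rw [show (fun (b : List (List Int)) (i : Int) =>
            b.modify (PySem.List.pyGetD keyword.toList
              (PySem.Int.mod i (keyword.toList.length : Int)) ' ').toNat
              (fun l => l ++ [i]))
          = (fun (b : List (List Int)) (i : Int) =>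
            b.modify ((fun j => (pvExt keyword j).toNat) i) (fun l => l ++ [i])) from rfl]
      rw [pv_foldl_modify (fun j => (pvExt keyword j).toNat) P
        (fun i _ => pv_code_lt keyword hDomStr i)]
      rw [PySem.List.foldl_append_eq_flatten]
      simp
    rw [hA, hB, hys, List.map_flatten, List.map_map]
    congr 1
    apply List.map_congr_left
    intro c _
    simp only [Function.comp]
    rw [List.filter_map, List.map_map]
    rw [show ((fun p : Char × Int => p.1.toNat == c) ∘ pvG keyword)
        = (fun i => (pvExt keyword i).toNat == c) from rfl]
    rw [show ((fun p : Char × Int => p.2) ∘ pvG keyword) = id from rfl, List.map_id]
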